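-- pv_equiv track=rewrite | github.com/AmadoMiguel/Coding-problems | Python/October-2019/rectangleOfOnes.py | findIndexesOfContOnes
-- ===== SOURCE A (Python) =====
-- def findIndexesOfContOnes(row, ptrCol1, ptrCol2, setsOfIndexes):
--     if 0 not in row[ptrCol1: ptrCol2+1] and ptrCol2 - ptrCol1 > 0:
--         setsOfIndexes.append(list(range(ptrCol1, ptrCol2+1)))
--     if ptrCol2 + 1 <= len(row)-1:
--         setsOfIndexes = findIndexesOfContOnes(row, ptrCol1, ptrCol2 + 1, setsOfIndexes)
--     elif ptrCol1+1 < len(row):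
--         setsOfIndexes = findIndexesOfContOnes(row, ptrCol1+1, ptrCol1+1, setsOfIndexes)
--     return setsOfIndexes
-- ===== SOURCE B (Python) =====
-- # B: iterative double sweep with an incremental all-ones flag — for each start a
-- # it walks the end pointer once, updating 'ok' in O(1) per step, instead of
-- # re-slicing and re-scanning the row for every (start, end) pair.
-- # Like the original, appends to setsOfIndexes in place and returns it.
-- def findIndexesOfContOnes(row, ptrCol1, ptrCol2, setsOfIndexes):
--     n = len(row)
--     a, b = ptrCol1, ptrCol2
--     while a < n:
--         ok = all(x != 0 for x in row[a:b])
--         for e in range(b, n):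
--             ok = ok and row[e] != 0
--             if ok and e > a:
--                 setsOfIndexes.append(list(range(a, e + 1)))
--         a += 1
--         b = a
--     return setsOfIndexes
-- ===== Notes on version B (the rewrite author's own statement) =====
-- stated objective: alternative
-- what changed: A recursively re-slices and re-scans row[a:b+1] for every (start,end) pointer pair; B is an iterative double sweep carrying an incremental all-ones flag, one O(1) step per pair instead of an O(n) slice scan; Pre_ keeps the pointers in the natural domain 0 <= ptrCol1 <= ptrCol2 < len(row) (or the start already past the row with the end not beyond it, where both return the input unchanged) because outside it A's slice wraparound/clipping emits index lists that do not index the row, and Pre_ also bounds A's closed-form recursion count by 33000 since deeper inputs make A raise RecursionError.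
-- outside the precondition, e.g. on findIndexesOfContOnes([0], -2, -1, []): A returns [[-2, -1]], B returns []; on findIndexesOfContOnes([1, 1], 0, 5, []): A returns [[0, 1, 2, 3, 4, 5]], B returns []; on findIndexesOfContOnes([0, 1, 1], 1, 0, []): A returns [[1, 2]], B returns []
import Mathlib
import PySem

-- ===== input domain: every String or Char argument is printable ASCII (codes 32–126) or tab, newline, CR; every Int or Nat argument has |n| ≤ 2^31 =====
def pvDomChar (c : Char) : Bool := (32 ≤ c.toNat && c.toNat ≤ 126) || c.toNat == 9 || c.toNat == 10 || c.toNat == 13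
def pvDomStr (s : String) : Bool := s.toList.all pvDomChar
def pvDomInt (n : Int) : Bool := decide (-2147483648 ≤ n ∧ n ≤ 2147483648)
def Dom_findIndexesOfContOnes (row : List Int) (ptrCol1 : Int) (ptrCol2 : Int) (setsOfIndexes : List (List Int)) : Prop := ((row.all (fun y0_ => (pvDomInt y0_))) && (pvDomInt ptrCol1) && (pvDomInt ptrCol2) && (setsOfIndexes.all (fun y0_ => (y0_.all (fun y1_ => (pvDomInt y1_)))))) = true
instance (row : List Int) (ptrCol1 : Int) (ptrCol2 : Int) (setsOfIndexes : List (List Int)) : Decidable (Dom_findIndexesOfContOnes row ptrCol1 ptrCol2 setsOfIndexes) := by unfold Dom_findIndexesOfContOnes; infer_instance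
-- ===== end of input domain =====

-- B replaces A's recursive re-slice-and-rescan per (start,end) pair by an iterative
-- double sweep with an incremental all-ones flag, one O(1) step per pair instead of
-- an O(n) slice scan (objective: alternative; intended as faster — the timing
-- run's readings at the largest size A completes were inconsistent across runs,
-- so no speed is claimed).
-- Both A and B append to setsOfIndexes in place and return it; the equivalence proved
-- here is about the return value (B performs the same appends in the same order).

-- ===== PORT A =====
def findIndexesOfContOnes (row : List Int) (ptrCol1 : Int) (ptrCol2 : Int) (setsOfIndexes : List (List Int)) : List (List Int) :=
  let s := if 0 ∉ PySem.List.slice row (some ptrCol1) (some (ptrCol2 + 1)) ∧ ptrCol2 - ptrCol1 > 0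
           then setsOfIndexes ++ [PySem.List.pyRange ptrCol1 (ptrCol2 + 1) 1]
           else setsOfIndexes
  if ptrCol2 + 1 ≤ (row.length : Int) - 1 then
    findIndexesOfContOnes row ptrCol1 (ptrCol2 + 1) s
  else if ptrCol1 + 1 < (row.length : Int) then
    findIndexesOfContOnes row (ptrCol1 + 1) (ptrCol1 + 1) s
  else s
termination_by (((row.length : Int) - ptrCol1).toNat, ((row.length : Int) - 1 - ptrCol2).toNat)
decreasing_by
  · exact Prod.Lex.right _ (by omega)
  · exact Prod.Lex.left _ _ (by omega)

-- ===== PORT B =====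
-- Source B's inner 'for e in range(b, n)' loop; ok is the running all-ones flag
def pvInnerB (row : List Int) (a : Int) (e : Int) (ok : Bool) (acc : List (List Int)) : List (List Int) :=
  if _h : e < (row.length : Int) then
    let ok' := ok && !(PySem.List.pyGetD row e 0 == 0)
    let acc' := if ok' = true ∧ e > a then acc ++ [PySem.List.pyRange a (e + 1) 1] else acc
    pvInnerB row a (e + 1) ok' acc'
  else acc
termination_by ((row.length : Int) - e).toNat
decreasing_by omega

-- Source B's outer 'while a < n' loop
def pvOuterB (row : List Int) (a : Int) (b : Int) (acc : List (List Int)) : List (List Int) :=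
  if _h : a < (row.length : Int) then
    let ok := (PySem.List.slice row (some a) (some b)).all (fun x => !(x == 0))
    pvOuterB row (a + 1) (a + 1) (pvInnerB row a b ok acc)
  else acc
termination_by ((row.length : Int) - a).toNat
decreasing_by omega

def findIndexesOfContOnes_alt (row : List Int) (ptrCol1 : Int) (ptrCol2 : Int) (setsOfIndexes : List (List Int)) : List (List Int) :=
  pvOuterB row ptrCol1 ptrCol2 setsOfIndexes

-- ===== PRECONDITION & SPEC =====
-- Pre_ restricts the pointers to the function's natural domain, 0 ≤ ptrCol1 ≤ ptrCol2
-- within the row (or both pointers equal and past an exhausted row, where both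
-- programs return the input unchanged): outside it A's slice wraparound/clipping
-- makes it emit index lists that do not index the row (negative or past the end) —
-- an accident of slicing — and on rows long enough that A's one-call-per-pair
-- recursion exceeds the interpreter's limit A raises RecursionError; the closed-form
-- call-count bound (≤ 33000) excludes exactly those deep inputs.
def Pre_findIndexesOfContOnes (row : List Int) (ptrCol1 : Int) (ptrCol2 : Int) (setsOfIndexes : List (List Int)) : Prop :=
  (0 ≤ ptrCol1 ∧ ptrCol1 ≤ ptrCol2 ∧ ptrCol2 < (row.length : Int) ∧
    1 + ((row.length : Int) - 1 - ptrCol2)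
      + (if ptrCol1 + 1 < (row.length : Int)
          then ((row.length : Int) - 1 - ptrCol1) * ((row.length : Int) - ptrCol1) / 2 else 0) ≤ 33000)
  ∨ ((row.length : Int) ≤ ptrCol1 ∧ ptrCol2 ≤ ptrCol1 ∧
      1 + ((row.length : Int) - 1 - ptrCol2) ≤ 33000)
instance (row : List Int) (ptrCol1 : Int) (ptrCol2 : Int) (setsOfIndexes : List (List Int)) : Decidable (Pre_findIndexesOfContOnes row ptrCol1 ptrCol2 setsOfIndexes) := by unfold Pre_findIndexesOfContOnes; infer_instance

def pvWitness_findIndexesOfContOnes : List Int × Int × Int × List (List Int) := ([1, 0, 1, 1], 0, 0, [])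

def Spec_findIndexesOfContOnes (row : List Int) (ptrCol1 : Int) (ptrCol2 : Int) (setsOfIndexes : List (List Int)) (out : List (List Int)) : Prop := out = findIndexesOfContOnes_alt row ptrCol1 ptrCol2 setsOfIndexes
instance (row : List Int) (ptrCol1 : Int) (ptrCol2 : Int) (setsOfIndexes : List (List Int)) (out : List (List Int)) : Decidable (Spec_findIndexesOfContOnes row ptrCol1 ptrCol2 setsOfIndexes out) := by unfold Spec_findIndexesOfContOnes; infer_instance

-- ===== CLAIM =====
def Claim_equal_findIndexesOfContOnes : Prop := ∀ (row : List Int) (ptrCol1 : Int) (ptrCol2 : Int) (setsOfIndexes : List (List Int)), Dom_findIndexesOfContOnes row ptrCol1 ptrCol2 setsOfIndexes → Pre_findIndexesOfContOnes row ptrCol1 ptrCol2 setsOfIndexes → Spec_findIndexesOfContOnes row ptrCol1 ptrCol2 setsOfIndexes (findIndexesOfContOnes row ptrCol1 ptrCol2 setsOfIndexes)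

-- ===== LEMMAS AND PROOFS =====

-- a Bool all-nonzero test is exactly non-membership of 0
lemma pvAll_iff (l : List Int) : ((l.all (fun x => !(x == 0))) = true) ↔ 0 ∉ l := by
  simp [List.all_eq_true]
  constructor
  · intro h hm; exact h 0 hm rfl
  · intro h x hx he; exact h (he ▸ hx)

-- row[a:b+1] = row[a:b] ++ [row[b]]  for 0 ≤ a ≤ b < len
lemma pvSlice_succ (row : List Int) (a b : Int) (h0 : 0 ≤ a) (hab : a ≤ b)
    (hb : b < (row.length : Int)) :
    PySem.List.slice row (some a) (some (b + 1))
      = PySem.List.slice row (some a) (some b) ++ [row[b.toNat]'(by omega)] := by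
  rw [PySem.List.slice_toNat row h0 (by omega), PySem.List.slice_toNat row h0 (by omega)]
  have h1 : (b + 1).toNat - a.toNat = (b.toNat - a.toNat) + 1 := by omega
  rw [h1, List.take_add_one]
  congr 1
  rw [List.getElem?_drop]
  have h2 : a.toNat + (b.toNat - a.toNat) = b.toNat := by omega
  rw [h2, List.getElem?_eq_getElem (by omega)]
  simp

-- the tail of Source B's outer loop after one start has been fully processed
def pvCont (row : List Int) (a : Int) (acc : List (List Int)) : List (List Int) :=
  if a + 1 < (row.length : Int) then pvOuterB row (a + 1) (a + 1) acc else acc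

lemma pvOuterB_eq (row : List Int) (a b : Int) (acc : List (List Int)) (ha : a < (row.length : Int)) :
    pvOuterB row a b acc
      = pvCont row a (pvInnerB row a b ((PySem.List.slice row (some a) (some b)).all (fun x => !(x == 0))) acc) := by
  rw [pvOuterB, dif_pos ha, pvCont]
  by_cases h : a + 1 < (row.length : Int)
  · rw [if_pos h]
  · rw [if_neg h, pvOuterB, dif_neg (by omega)]

lemma pvInnerB_step (row : List Int) (a e : Int) (ok : Bool) (acc : List (List Int))
    (he : e < (row.length : Int)) :
    pvInnerB row a e ok acc
      = pvInnerB row a (e + 1) (ok && !(PySem.List.pyGetD row e 0 == 0))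
          (if (ok && !(PySem.List.pyGetD row e 0 == 0)) = true ∧ e > a
            then acc ++ [PySem.List.pyRange a (e + 1) 1] else acc) := by
  rw [pvInnerB, dif_pos he]

lemma pvInnerB_stop (row : List Int) (a e : Int) (ok : Bool) (acc : List (List Int))
    (he : ¬ e < (row.length : Int)) :
    pvInnerB row a e ok acc = acc := by
  rw [pvInnerB, dif_neg he]

-- the incremental flag after absorbing row[e] decides 0 ∉ row[a:e+1]
lemma pvOk_step (row : List Int) (a e : Int) (ok : Bool)
    (h0 : 0 ≤ a) (hae : a ≤ e) (he : e < (row.length : Int))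
    (hok : ok = true ↔ 0 ∉ PySem.List.slice row (some a) (some e)) :
    ((ok && !(PySem.List.pyGetD row e 0 == 0)) = true)
      ↔ 0 ∉ PySem.List.slice row (some a) (some (e + 1)) := by
  rw [pvSlice_succ row a e h0 hae he]
  have hg : PySem.List.pyGetD row e 0 = row[e.toNat]'(by omega) :=
    PySem.List.pyGetD_eq_getElem row 0 (h0.trans hae) (by omega)
  simp only [Bool.and_eq_true, Bool.not_eq_true', beq_eq_false_iff_ne, hok, hg,
    List.mem_append, List.mem_singleton, not_or]
  exact ⟨fun ⟨u, v⟩ => ⟨u, fun h => v h.symm⟩, fun ⟨u, v⟩ => ⟨u, fun h => v h.symm⟩⟩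

theorem pvMain (row : List Int) (ptrCol1 ptrCol2 : Int) (acc : List (List Int)) :
    0 ≤ ptrCol1 → ptrCol1 ≤ ptrCol2 → ptrCol2 < (row.length : Int) →
    ∀ ok : Bool, (ok = true ↔ 0 ∉ PySem.List.slice row (some ptrCol1) (some ptrCol2)) →
      findIndexesOfContOnes row ptrCol1 ptrCol2 acc
        = pvCont row ptrCol1 (pvInnerB row ptrCol1 ptrCol2 ok acc) := by
  refine findIndexesOfContOnes.induct row
    (motive := fun p1 p2 a =>
      0 ≤ p1 → p1 ≤ p2 → p2 < (row.length : Int) →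
      ∀ ok : Bool, (ok = true ↔ 0 ∉ PySem.List.slice row (some p1) (some p2)) →
        findIndexesOfContOnes row p1 p2 a = pvCont row p1 (pvInnerB row p1 p2 ok a))
    ?_ ?_ ?_ ptrCol1 ptrCol2 acc
  · -- A advances the end pointer = one inner step of B
    intro p1 p2 a s hc1 ih h0 h12 h2 ok hok
    have hok' := pvOk_step row p1 p2 ok h0 h12 h2 hok
    have hs : s = (if 0 ∉ PySem.List.slice row (some p1) (some (p2 + 1)) ∧ p2 - p1 > 0
        then a ++ [PySem.List.pyRange p1 (p2 + 1) 1] else a) := rfl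
    have hs2 : s = (if (ok && !(PySem.List.pyGetD row p2 0 == 0)) = true ∧ p2 > p1
        then a ++ [PySem.List.pyRange p1 (p2 + 1) 1] else a) :=
      hs.trans (if_congr (and_congr hok'.symm Int.sub_pos) rfl rfl)
    rw [findIndexesOfContOnes, if_pos hc1, ← hs,
        ih h0 (by omega) (by omega) _ hok']
    congr 1
    rw [pvInnerB_step row p1 p2 ok a h2, ← hs2]
  · -- A advances the start pointer = B finishes this start and begins the next
    intro p1 p2 a s hc1 hc2 ih h0 h12 h2 ok hok
    have hok' := pvOk_step row p1 p2 ok h0 h12 h2 hok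
    have hs : s = (if 0 ∉ PySem.List.slice row (some p1) (some (p2 + 1)) ∧ p2 - p1 > 0
        then a ++ [PySem.List.pyRange p1 (p2 + 1) 1] else a) := rfl
    have hs2 : s = (if (ok && !(PySem.List.pyGetD row p2 0 == 0)) = true ∧ p2 > p1
        then a ++ [PySem.List.pyRange p1 (p2 + 1) 1] else a) :=
      hs.trans (if_congr (and_congr hok'.symm Int.sub_pos) rfl rfl)
    have hin : pvInnerB row p1 p2 ok a = s := by
      rw [pvInnerB_step row p1 p2 ok a h2,
          pvInnerB_stop row p1 (p2 + 1) _ _ (by omega), ← hs2]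
    rw [findIndexesOfContOnes, if_neg hc1, if_pos hc2, ← hs,
        ih (by omega) le_rfl hc2
          ((PySem.List.slice row (some (p1 + 1)) (some (p1 + 1))).all (fun x => !(x == 0)))
          (pvAll_iff _),
        hin]
    unfold pvCont
    rw [if_pos hc2, pvOuterB_eq row (p1 + 1) (p1 + 1) s hc2]
    rfl
  · -- both pointers exhausted: both sides stop
    intro p1 p2 a hc1 hc2 h0 h12 h2 ok hok
    have hok' := pvOk_step row p1 p2 ok h0 h12 h2 hok
    have hin : pvInnerB row p1 p2 ok a
        = (if 0 ∉ PySem.List.slice row (some p1) (some (p2 + 1)) ∧ p2 - p1 > 0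
            then a ++ [PySem.List.pyRange p1 (p2 + 1) 1] else a) := by
      rw [pvInnerB_step row p1 p2 ok a h2,
          pvInnerB_stop row p1 (p2 + 1) _ _ (by omega)]
      exact (if_congr (and_congr hok'.symm Int.sub_pos) rfl rfl).symm
    rw [findIndexesOfContOnes, if_neg hc1, if_neg hc2, hin]
    unfold pvCont
    rw [if_neg hc2]

-- the degenerate admitted corner: start pointer past the row (end not beyond it) —
-- A walks the end pointer to the row's edge appending nothing, B's outer loop never runs
lemma pvANoopAux (row : List Int) (k : Nat) :
    ∀ p1 p2 : Int, ∀ acc : List (List Int),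
      ((row.length : Int) - 1 - p2).toNat = k → (row.length : Int) ≤ p1 → p2 ≤ p1 →
      findIndexesOfContOnes row p1 p2 acc = acc := by
  induction k with
  | zero =>
    intro p1 p2 acc hk h1 h2
    rw [findIndexesOfContOnes, if_neg (by omega), if_neg (by omega)]
    exact if_neg (fun h => by omega)
  | succ k ih =>
    intro p1 p2 acc hk h1 h2
    rw [findIndexesOfContOnes]
    by_cases hc : p2 + 1 ≤ (row.length : Int) - 1
    · rw [if_pos hc, if_neg (fun h => by omega)]
      exact ih p1 (p2 + 1) acc (by omega) h1 (by omega)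
    · rw [if_neg hc, if_neg (by omega)]
      exact if_neg (fun h => by omega)

lemma pvDegenerate (row : List Int) (p1 p2 : Int) (acc : List (List Int))
    (h1 : (row.length : Int) ≤ p1) (h2 : p2 ≤ p1) :
    findIndexesOfContOnes row p1 p2 acc = pvOuterB row p1 p2 acc := by
  rw [pvANoopAux row ((row.length : Int) - 1 - p2).toNat p1 p2 acc rfl h1 h2,
      pvOuterB, dif_neg (by omega)]

-- ===== VERDICT =====
theorem findIndexesOfContOnes_spec : Claim_equal_findIndexesOfContOnes := by
  intro row p1 p2 acc _ hpre
  unfold Spec_findIndexesOfContOnes findIndexesOfContOnes_alt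
  rcases hpre with ⟨h0, h12, h2, -⟩ | ⟨hlen, heq, -⟩
  · rw [pvMain row p1 p2 acc h0 h12 h2
        ((PySem.List.slice row (some p1) (some p2)).all (fun x => !(x == 0)))
        (pvAll_iff _),
        pvOuterB_eq row p1 p2 acc (by omega)]
  · exact pvDegenerate row p1 p2 acc hlen heq
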